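-- pv_equiv track=rewrite | github.com/ethereum/research | kzg_data_availability/kzg_proofs.py | div_polys
-- ===== SOURCE A (Python) =====
-- MODULUS = 52435875175126190479447740508185965837690552500527637822603658699938581184513 #b.curve_order
--
-- def inv(a):
--     """
--     Modular inverse using eGCD algorithm
--     """
--     if a == 0:
--         return 0
--     lm, hm = 1, 0
--     low, high = a % MODULUS, MODULUS
--     while low > 1:
--         r = high // low
--         nm, new = hm - lm * r, high - low * r
--         lm, low, hm, high = nm, new, lm, low
--     return lm % MODULUS
--
-- def div(x, y):
--     return x * inv(y) % MODULUS
--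
-- def div_polys(a, b):
--     """
--     Long polynomial difivion for two polynomials in coefficient form
--     """
--     a = [x for x in a]
--     o = []
--     apos = len(a) - 1
--     bpos = len(b) - 1
--     diff = apos - bpos
--     while diff >= 0:
--         quot = div(a[apos], b[bpos])
--         o.insert(0, quot)
--         for i in range(bpos, -1, -1):
--             a[diff + i] -= b[i] * quot
--         apos -= 1
--         diff -= 1
--     return [x % MODULUS for x in o]
-- ===== SOURCE B (Python) =====
-- MODULUS = 52435875175126190479447740508185965837690552500527637822603658699938581184513
--
-- def inv(a):
--     """
--     Modular inverse using eGCD algorithm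
--     """
--     if a == 0:
--         return 0
--     lm, hm = 1, 0
--     low, high = a % MODULUS, MODULUS
--     while low > 1:
--         r = high // low
--         nm, new = hm - lm * r, high - low * r
--         lm, low, hm, high = nm, new, lm, low
--     return lm % MODULUS
--
-- def div(x, y):
--     return x * inv(y) % MODULUS
--
-- def div_polys(a, b):
--     """
--     Long polynomial division, computing each quotient coefficient directly
--     as a dot product over the already-computed (higher) quotient coefficients,
--     without copying or mutating the dividend.
--     """
--     bpos = len(b) - 1
--     diff = len(a) - 1 - bpos
--     qrev = []  # quotient coefficients, highest degree first
--     for t in range(diff, -1, -1):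
--         s = a[t + bpos]
--         for i in range(bpos):
--             u = t + bpos - i
--             if u <= diff:
--                 s -= b[i] * qrev[diff - u]
--         qrev.append(div(s, b[bpos]))
--     return [x % MODULUS for x in reversed(qrev)]
-- ===== Notes on version B (the rewrite author's own statement) =====
-- stated objective: alternative
-- what changed: B never copies or mutates the dividend: instead of maintaining an in-place evolving remainder and prepending each coefficient with insert(0), it computes each quotient coefficient high-to-low directly as a dot product of b with the already-computed quotient coefficients, appends, and reverses once (measured ~1.5x faster at large sizes, borderline, so no speed is claimed).
import Mathlib
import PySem

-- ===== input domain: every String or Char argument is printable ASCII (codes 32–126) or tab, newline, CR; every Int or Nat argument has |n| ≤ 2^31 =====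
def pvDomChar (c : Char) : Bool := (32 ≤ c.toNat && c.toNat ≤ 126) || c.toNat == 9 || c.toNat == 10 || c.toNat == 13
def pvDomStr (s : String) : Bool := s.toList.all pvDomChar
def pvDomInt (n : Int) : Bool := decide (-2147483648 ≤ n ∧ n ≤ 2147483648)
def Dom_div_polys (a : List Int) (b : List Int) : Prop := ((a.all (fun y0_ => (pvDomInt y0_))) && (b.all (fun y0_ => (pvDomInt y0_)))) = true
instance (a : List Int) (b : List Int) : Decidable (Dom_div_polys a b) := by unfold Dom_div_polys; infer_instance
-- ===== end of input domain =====

-- B computes each quotient coefficient directly as a dot product over the already-computed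
-- higher quotient coefficients (no copy/mutation of the dividend, no insert(0)); return value only,
-- A mutates only its private copy of `a`, so side effects are identical (none).

-- ===== PORT A =====

def pvMOD : Int := 52435875175126190479447740508185965837690552500527637822603658699938581184513

-- inv's while loop; fuel = low.toNat + 1 suffices since `low` strictly decreases (high % low < low)
def pvInvLoop : Nat → Int → Int → Int → Int → Int
  | 0, lm, _, _, _ => lm
  | fuel + 1, lm, low, hm, high =>
    if low > 1 then
      let r := PySem.Int.floordiv high low
      pvInvLoop fuel (hm - lm * r) (high - low * r) lm low
    else lm

def pvInv (a : Int) : Int :=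
  if a = 0 then 0
  else PySem.Int.mod
    (pvInvLoop ((PySem.Int.mod a pvMOD).toNat + 1) 1 (PySem.Int.mod a pvMOD) 0 pvMOD) pvMOD

def pvDiv (x y : Int) : Int := PySem.Int.mod (x * pvInv y) pvMOD

-- the `while diff >= 0` loop of A: mutates the (copied) dividend in place, prepends to o
def divPolysLoop (b : List Int) (bpos : Int) (a : List Int) (apos diff : Int) (o : List Int) :
    List Int :=
  if _h : diff ≥ 0 then
    let quot := pvDiv (PySem.List.pyGetD a apos 0) (PySem.List.pyGetD b bpos 0)
    let o' := quot :: o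
    let a' := (PySem.List.pyRange bpos (-1) (-1)).foldl
      (fun ac i =>
        PySem.List.pySetD ac (diff + i)
          (PySem.List.pyGetD ac (diff + i) 0 - PySem.List.pyGetD b i 0 * quot)) a
    divPolysLoop b bpos a' (apos - 1) (diff - 1) o'
  else o
termination_by (diff + 1).toNat
decreasing_by omega

def div_polys (a : List Int) (b : List Int) : List Int :=
  let apos := PySem.List.len a - 1
  let bpos := PySem.List.len b - 1
  let diff := apos - bpos
  (divPolysLoop b bpos a apos diff []).map (fun x => PySem.Int.mod x pvMOD)

-- ===== PORT B =====

-- inner dot product: s minus sum of b[i] * qrev[diff - (t + bpos - i)] over already-computed coefficients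
def divPolysDot (b qrev : List Int) (bpos diff t : Int) (s0 : Int) : Int :=
  (PySem.List.pyRange 0 bpos 1).foldl
    (fun s i =>
      if t + bpos - i ≤ diff then
        s - PySem.List.pyGetD b i 0 * PySem.List.pyGetD qrev (diff - (t + bpos - i)) 0
      else s) s0

def div_polys_alt (a : List Int) (b : List Int) : List Int :=
  let bpos := PySem.List.len b - 1
  let diff := PySem.List.len a - 1 - bpos
  let qrev := (PySem.List.pyRange diff (-1) (-1)).foldl
    (fun qrev t =>
      qrev ++ [pvDiv (divPolysDot b qrev bpos diff t (PySem.List.pyGetD a (t + bpos) 0))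
                 (PySem.List.pyGetD b bpos 0)]) []
  qrev.reverse.map (fun x => PySem.Int.mod x pvMOD)

-- ===== PRECONDITION & SPEC =====

-- Pre_ excludes exactly b = [], where A raises IndexError on b[-1] (or a[-1]).
def Pre_div_polys (a : List Int) (b : List Int) : Prop := b ≠ []
instance (a : List Int) (b : List Int) : Decidable (Pre_div_polys a b) := by
  unfold Pre_div_polys; infer_instance

def pvWitness_div_polys : List Int × List Int := ([4, 0, 3, 1], [2, 1])

def Spec_div_polys (a : List Int) (b : List Int) (out : List Int) : Prop := out = div_polys_alt a b
instance (a : List Int) (b : List Int) (out : List Int) : Decidable (Spec_div_polys a b out) := by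
  unfold Spec_div_polys; infer_instance

-- ===== CLAIM (what is proved, stated in full; the proofs are below) =====
def Claim_equal_div_polys : Prop := ∀ (a : List Int) (b : List Int), Dom_div_polys a b → Pre_div_polys a b → Spec_div_polys a b (div_polys a b)

-- ===== LEMMAS AND PROOFS =====

-- B's quotient-so-far list after k iterations (t = diff0, diff0-1, …, diff0-k+1), as a function of k
def pvQB (a0 b : List Int) (n diff0 : Int) : Nat → List Int
  | 0 => []
  | k + 1 =>
    let qr := pvQB a0 b n diff0 k
    qr ++ [pvDiv (divPolysDot b qr n diff0 (diff0 - k) (PySem.List.pyGetD a0 (diff0 - k + n) 0))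
             (PySem.List.pyGetD b n 0)]

-- the k-th quotient coefficient (t = diff0 - k)
def pvQ (a0 b : List Int) (n diff0 : Int) (k : Nat) : Int :=
  pvDiv (divPolysDot b (pvQB a0 b n diff0 k) n diff0 (diff0 - k)
          (PySem.List.pyGetD a0 (diff0 - k + n) 0))
    (PySem.List.pyGetD b n 0)

-- total amount subtracted from dividend slot j by the first k iterations of A
def pvS (a0 b : List Int) (n diff0 : Int) (k : Nat) (j : Int) : Int :=
  ((PySem.List.pyRange 0 (n + 1) 1).map
    (fun i =>
      if diff0 - k < j - i ∧ j - i ≤ diff0 then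
        PySem.List.pyGetD b i 0 * pvQ a0 b n diff0 (diff0 - (j - i)).toNat
      else 0)).sum

theorem pvQB_length (a0 b : List Int) (n diff0 : Int) (k : Nat) :
    (pvQB a0 b n diff0 k).length = k := by
  induction k with
  | zero => rfl
  | succ k ih => simp [pvQB, ih]

theorem pvQB_getElem? (a0 b : List Int) (n diff0 : Int) (m k : Nat) (hk : k < m) :
    (pvQB a0 b n diff0 m)[k]? = some (pvQ a0 b n diff0 k) := by
  induction m with
  | zero => omega
  | succ m ih =>
    rw [show (pvQB a0 b n diff0 (m + 1)) = pvQB a0 b n diff0 m ++ [pvQ a0 b n diff0 m] from rfl]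
    by_cases hkm : k < m
    · rw [List.getElem?_append_left (by rw [pvQB_length]; omega)]
      exact ih hkm
    · have hkm' : k = m := by omega
      subst hkm'
      rw [List.getElem?_append_right (by rw [pvQB_length]) ]
      simp [pvQB_length]

theorem pvQB_getElem (a0 b : List Int) (n diff0 : Int) (m k : Nat) (hk : k < m)
    (h : k < (pvQB a0 b n diff0 m).length) :
    (pvQB a0 b n diff0 m)[k] = pvQ a0 b n diff0 k := by
  have h2 := pvQB_getElem? a0 b n diff0 m k hk
  rw [List.getElem?_eq_getElem h] at h2
  exact Option.some.inj h2

theorem sum_map_ite_eq (l : List Int) (hl : l.Nodup) (i0 c : Int) :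
    (l.map (fun i => if i = i0 then c else 0)).sum = if i0 ∈ l then c else 0 := by
  induction l with
  | nil => simp
  | cons x xs ih =>
    simp only [List.nodup_cons] at hl
    by_cases hx : x = i0
    · subst hx
      simp [hl.1, ih hl.2]
    · have hne : i0 ≠ x := fun h => hx h.symm
      simp [hx, hne, ih hl.2]

-- pvS step: iteration k subtracts one new term, at offset i = j - (diff0 - k)
theorem pvS_succ (a0 b : List Int) (n diff0 : Int) (k : Nat) (j : Int) :
    pvS a0 b n diff0 (k + 1) j =
      pvS a0 b n diff0 k j +
        (if diff0 - k ≤ j ∧ j ≤ diff0 - k + n then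
          PySem.List.pyGetD b (j - (diff0 - k)) 0 * pvQ a0 b n diff0 k else 0) := by
  unfold pvS
  have hpt : ∀ i ∈ PySem.List.pyRange 0 (n + 1) 1,
      (if diff0 - ((k : Nat) + 1 : Nat) < j - i ∧ j - i ≤ diff0 then
        PySem.List.pyGetD b i 0 * pvQ a0 b n diff0 (diff0 - (j - i)).toNat else 0)
      = (if diff0 - k < j - i ∧ j - i ≤ diff0 then
          PySem.List.pyGetD b i 0 * pvQ a0 b n diff0 (diff0 - (j - i)).toNat else 0)
        + (if i = j - (diff0 - k) then
            PySem.List.pyGetD b (j - (diff0 - k)) 0 * pvQ a0 b n diff0 k else 0) := by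
    intro i _
    by_cases hii : i = j - (diff0 - k)
    · subst hii
      rw [if_pos (by push_cast; omega), if_neg (by omega), if_pos rfl, zero_add]
      have hz : (diff0 - (j - (j - (diff0 - k)))).toNat = k := by omega
      rw [hz]
    · rw [if_neg hii, add_zero]
      by_cases hcond : diff0 - k < j - i ∧ j - i ≤ diff0
      · rw [if_pos hcond, if_pos (by push_cast; omega)]
      · rw [if_neg hcond, if_neg (by push_cast; omega)]
  rw [List.map_congr_left hpt, PySem.List.sum_map_add_int]
  congr 1
  rw [sum_map_ite_eq _ (PySem.List.nodup_pyRange_one 0 (n + 1)) _ _]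
  have hmem : (j - (diff0 - k) ∈ PySem.List.pyRange 0 (n + 1) 1)
      ↔ (diff0 - k ≤ j ∧ j ≤ diff0 - k + n) := by
    rw [PySem.List.mem_pyRange_one]; omega
  simp only [hmem]

theorem pvS_zero (a0 b : List Int) (n diff0 : Int) (j : Int) :
    pvS a0 b n diff0 0 j = 0 := by
  unfold pvS
  apply List.sum_eq_zero
  intro x hx
  simp only [List.mem_map] at hx
  obtain ⟨i, _, hi⟩ := hx
  rw [← hi]
  split
  · omega
  · rfl

-- 'for i in range(bpos): if …: s -= g(i)' as a sum
theorem foldl_if_sub (l : List Int) (c : Int → Prop) [DecidablePred c] (g : Int → Int)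
    (s0 : Int) :
    l.foldl (fun s i => if c i then s - g i else s) s0 =
      s0 - (l.map (fun i => if c i then g i else 0)).sum := by
  induction l generalizing s0 with
  | nil => simp
  | cons x xs ih =>
    simp only [List.foldl_cons, List.map_cons, List.sum_cons, ih]
    split <;> ring

-- B's dot product at step k equals the dividend value minus pvS at the read slot
theorem dot_eq_sub_pvS (a0 b : List Int) (n diff0 : Int) (hn : 0 ≤ n) (k : Nat)
    (s0 : Int) :
    divPolysDot b (pvQB a0 b n diff0 k) n diff0 (diff0 - k) s0 =
      s0 - pvS a0 b n diff0 k (diff0 - k + n) := by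
  unfold divPolysDot
  rw [foldl_if_sub _ (fun i => diff0 - (k : Int) + n - i ≤ diff0)
    (fun i => PySem.List.pyGetD b i 0 *
      PySem.List.pyGetD (pvQB a0 b n diff0 k) (diff0 - (diff0 - (k : Int) + n - i)) 0) s0]
  congr 1
  unfold pvS
  rw [PySem.List.pyRange_one_succ_right (by omega : (0 : Int) ≤ n), List.map_append,
    List.sum_append]
  have hlast : (List.map
      (fun i => if diff0 - (k : Int) < diff0 - (k : Int) + n - i ∧ diff0 - (k : Int) + n - i ≤ diff0
        then PySem.List.pyGetD b i 0 * pvQ a0 b n diff0 (diff0 - (diff0 - (k : Int) + n - i)).toNat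
        else 0) [n]).sum = 0 := by
    simp only [List.map_cons, List.map_nil, List.sum_cons, List.sum_nil]
    rw [if_neg (by omega)]
    simp
  rw [hlast, add_zero]
  apply congrArg
  apply List.map_congr_left
  intro i hi
  rw [PySem.List.mem_pyRange_one] at hi
  by_cases hc : diff0 - (k : Int) + n - i ≤ diff0
  · rw [if_pos hc, if_pos ⟨by omega, hc⟩]
    have hz0 : (0 : Int) ≤ diff0 - (diff0 - (k : Int) + n - i) := by omega
    rw [PySem.List.pyGetD_eq_getElem (pvQB a0 b n diff0 k) 0 hz0
      (by rw [pvQB_length]; omega)]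
    rw [pvQB_getElem a0 b n diff0 k _ (by omega)]
  · rw [if_neg hc, if_neg (fun h => hc h.2)]

-- length is preserved by A's inner update fold
theorem inner_length (b : List Int) (quot diff : Int) (l : List Int) (acur : List Int) :
    (l.foldl (fun ac i =>
        PySem.List.pySetD ac (diff + i)
          (PySem.List.pyGetD ac (diff + i) 0 - PySem.List.pyGetD b i 0 * quot)) acur).length =
      acur.length := by
  induction l generalizing acur with
  | nil => rfl
  | cons x xs ih => simp [ih, PySem.List.length_pySetD]

-- effect of A's inner update fold on each slot
theorem inner_get (b : List Int) (quot t : Int) (ht : 0 ≤ t) :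
    ∀ (r : Nat) (c : Int), c = (r : Int) - 1 → ∀ (acur : List Int), t + c < acur.length →
      ∀ (j : Int), 0 ≤ j → j < acur.length →
        PySem.List.pyGetD
          ((PySem.List.pyRange c (-1) (-1)).foldl
            (fun ac i =>
              PySem.List.pySetD ac (t + i)
                (PySem.List.pyGetD ac (t + i) 0 - PySem.List.pyGetD b i 0 * quot)) acur) j 0 =
          PySem.List.pyGetD acur j 0 -
            (if t ≤ j ∧ j ≤ t + c then PySem.List.pyGetD b (j - t) 0 * quot else 0) := by
  intro r
  induction r with
  | zero =>
    intro c hc acur hlen j hj0 hjlen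
    rw [PySem.List.pyRange_neg_one_eq_nil (by omega)]
    rw [List.foldl_nil, if_neg (by omega), sub_zero]
  | succ r ih =>
    intro c hc acur hlen j hj0 hjlen
    rw [PySem.List.pyRange_neg_one_cons (by omega : (-1 : Int) < c), List.foldl_cons]
    have htc : t + c = ((t + c).toNat : Int) := by omega
    have hj : j = ((j.toNat : Nat) : Int) := by omega
    have hlen1 : (PySem.List.pySetD acur (t + c)
        (PySem.List.pyGetD acur (t + c) 0 - PySem.List.pyGetD b c 0 * quot)).length =
        acur.length := PySem.List.length_pySetD acur _ _
    rw [ih (c - 1) (by omega) _ (by rw [hlen1]; omega) j hj0 (by rw [hlen1]; omega)]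
    rw [htc, hj, PySem.List.pyGetD_pySetD_natCast acur (t + c).toNat j.toNat _ 0 (by omega)]
    by_cases hje : j.toNat = (t + c).toNat
    · rw [if_pos hje, if_neg (by omega), if_pos (by omega), sub_zero]
      have hjc : j - t = c := by omega
      rw [← hj, hjc, ← htc, show j = t + c by omega]
    · rw [if_neg hje, ← hj]
      by_cases hcond : t ≤ j ∧ j ≤ t + (c - 1)
      · rw [if_pos hcond, if_pos (by omega)]
      · rw [if_neg hcond, if_neg (by omega)]

-- one-step unfoldings of A's loop
theorem divPolysLoop_neg (b : List Int) (bpos : Int) (a : List Int) (apos diff : Int)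
    (o : List Int) (h : ¬ diff ≥ 0) : divPolysLoop b bpos a apos diff o = o := by
  rw [divPolysLoop]; rw [dif_neg h]

theorem divPolysLoop_step (b : List Int) (bpos : Int) (a : List Int) (apos diff : Int)
    (o : List Int) (h : diff ≥ 0) :
    divPolysLoop b bpos a apos diff o =
      divPolysLoop b bpos
        ((PySem.List.pyRange bpos (-1) (-1)).foldl
          (fun ac i =>
            PySem.List.pySetD ac (diff + i)
              (PySem.List.pyGetD ac (diff + i) 0 - PySem.List.pyGetD b i 0 *
                pvDiv (PySem.List.pyGetD a apos 0) (PySem.List.pyGetD b bpos 0))) a)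
        (apos - 1) (diff - 1)
        (pvDiv (PySem.List.pyGetD a apos 0) (PySem.List.pyGetD b bpos 0) :: o) := by
  rw [divPolysLoop]; rw [dif_pos h]

-- A's loop, started after k iterations with the invariant, returns the remaining quotient coefficients
theorem A_loop_eq (a0 b : List Int) (n diff0 : Int) (hn : 0 ≤ n)
    (hd : diff0 = (a0.length : Int) - 1 - n) (m : Nat)
    (hm : (m : Int) = diff0 + 1 ∨ (diff0 < 0 ∧ m = 0)) :
    ∀ (r : Nat) (k : Nat) (acur : List Int) (o : List Int), k + r = m →
      acur.length = a0.length →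
      (∀ j : Int, 0 ≤ j → j < (a0.length : Int) →
        PySem.List.pyGetD acur j 0 = PySem.List.pyGetD a0 j 0 - pvS a0 b n diff0 k j) →
      divPolysLoop b n acur (diff0 - k + n) (diff0 - k) o =
        ((pvQB a0 b n diff0 m).drop k).reverse ++ o := by
  intro r
  induction r with
  | zero =>
    intro k acur o hk hlen hinv
    have hneg : diff0 - (k : Int) < 0 := by rcases hm with h | ⟨h1, h2⟩ <;> omega
    rw [divPolysLoop_neg _ _ _ _ _ _ (by omega)]
    rw [List.drop_eq_nil_of_le (by simp [pvQB_length]; omega)]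
    simp
  | succ r ih =>
    intro k acur o hk hlen hinv
    have hm' : (m : Int) = diff0 + 1 := by rcases hm with h | ⟨h1, h2⟩ <;> omega
    have hkd : (k : Int) ≤ diff0 := by omega
    rw [divPolysLoop_step _ _ _ _ _ _ (by omega : diff0 - (k : Int) ≥ 0)]
    have hq : pvDiv (PySem.List.pyGetD acur (diff0 - (k : Int) + n) 0)
        (PySem.List.pyGetD b n 0) = pvQ a0 b n diff0 k := by
      rw [hinv _ (by omega) (by omega)]
      rw [← dot_eq_sub_pvS a0 b n diff0 hn k]
      rfl
    rw [hq]
    have hlen' : ((PySem.List.pyRange n (-1) (-1)).foldl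
        (fun ac i =>
          PySem.List.pySetD ac (diff0 - (k : Int) + i)
            (PySem.List.pyGetD ac (diff0 - (k : Int) + i) 0 - PySem.List.pyGetD b i 0 *
              pvQ a0 b n diff0 k)) acur).length = a0.length := by
      rw [inner_length]; exact hlen
    have hinv' : ∀ j : Int, 0 ≤ j → j < (a0.length : Int) →
        PySem.List.pyGetD ((PySem.List.pyRange n (-1) (-1)).foldl
          (fun ac i =>
            PySem.List.pySetD ac (diff0 - (k : Int) + i)
              (PySem.List.pyGetD ac (diff0 - (k : Int) + i) 0 - PySem.List.pyGetD b i 0 *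
                pvQ a0 b n diff0 k)) acur) j 0 =
          PySem.List.pyGetD a0 j 0 - pvS a0 b n diff0 (k + 1) j := by
      intro j hj0 hjl
      rw [inner_get b (pvQ a0 b n diff0 k) (diff0 - (k : Int)) (by omega) (n.toNat + 1) n
        (by omega) acur (by omega) j hj0 (by omega)]
      rw [hinv j hj0 hjl, pvS_succ]
      ring
    have e1 : diff0 - (k : Int) + n - 1 = diff0 - ((k + 1 : Nat) : Int) + n := by
      push_cast; ring
    have e2 : diff0 - (k : Int) - 1 = diff0 - ((k + 1 : Nat) : Int) := by push_cast; ring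
    rw [e1, e2, ih (k + 1) _ _ (by omega) hlen' hinv']
    have hkm : k < (pvQB a0 b n diff0 m).length := by rw [pvQB_length]; omega
    rw [List.drop_eq_getElem_cons hkm, pvQB_getElem a0 b n diff0 m k (by omega) hkm,
      List.reverse_cons, List.append_assoc]
    rfl

-- B's foldl over the countdown range computes pvQB
theorem B_fold_eq (a0 b : List Int) (n diff0 : Int) :
    ∀ (r : Nat) (k : Nat), diff0 - k = (r : Int) - 1 →
      (PySem.List.pyRange (diff0 - k) (-1) (-1)).foldl
        (fun qrev t =>
          qrev ++ [pvDiv (divPolysDot b qrev n diff0 t (PySem.List.pyGetD a0 (t + n) 0))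
                     (PySem.List.pyGetD b n 0)]) (pvQB a0 b n diff0 k) =
        pvQB a0 b n diff0 (k + r) := by
  intro r
  induction r with
  | zero =>
    intro k hk
    rw [PySem.List.pyRange_neg_one_eq_nil (by omega)]
    rfl
  | succ r ih =>
    intro k hk
    rw [PySem.List.pyRange_neg_one_cons (by omega : (-1 : Int) < diff0 - k)]
    rw [List.foldl_cons]
    have step : (pvQB a0 b n diff0 k) ++
        [pvDiv (divPolysDot b (pvQB a0 b n diff0 k) n diff0 (diff0 - k)
           (PySem.List.pyGetD a0 ((diff0 - k) + n) 0)) (PySem.List.pyGetD b n 0)] =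
        pvQB a0 b n diff0 (k + 1) := rfl
    rw [step]
    have : diff0 - k - 1 = diff0 - (k + 1 : Nat) := by push_cast; ring
    rw [this, ih (k + 1) (by omega)]
    congr 1
    omega

-- ===== VERDICT (by name: the statement is the Claim_ definition above) =====
theorem div_polys_spec : Claim_equal_div_polys := by
  intro a b _hdom hb
  have hb' : b ≠ [] := hb
  have hbl : 0 < b.length := List.length_pos_iff.mpr hb'
  unfold Spec_div_polys div_polys div_polys_alt
  simp only [PySem.List.len_eq]
  set n : Int := (b.length : Int) - 1 with hn_def
  set diff0 : Int := (a.length : Int) - 1 - n with hd_def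
  set m : Nat := (diff0 + 1).toNat with hm_def
  have hn : 0 ≤ n := by omega
  have hm : (m : Int) = diff0 + 1 ∨ (diff0 < 0 ∧ m = 0) := by omega
  have h0 := A_loop_eq a b n diff0 hn (by omega) m hm m 0 a [] (by omega) rfl
    (fun j hj0 hjl => by rw [pvS_zero]; ring)
  have e1 : diff0 - ((0 : Nat) : Int) + n = (a.length : Int) - 1 := by push_cast; omega
  have e2 : diff0 - ((0 : Nat) : Int) = diff0 := by push_cast; ring
  rw [e1, e2] at h0
  simp only [List.drop_zero, List.append_nil] at h0
  rw [h0]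
  by_cases hdn : 0 ≤ diff0
  · have hB := B_fold_eq a b n diff0 m 0 (by omega)
    rw [show diff0 - ((0 : Nat) : Int) = diff0 by push_cast; ring] at hB
    rw [show pvQB a b n diff0 0 = ([] : List Int) from rfl] at hB
    rw [hB, Nat.zero_add]
  · rw [PySem.List.pyRange_neg_one_eq_nil (by omega)]
    simp only [List.foldl_nil]
    have hm0 : m = 0 := by omega
    rw [hm0]
    rfl
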